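-- pv_equiv track=rewrite | github.com/Sanikavg/python-mini-projects | string manipulator.py | upit
-- ===== SOURCE A (Python) =====
-- def upit(s):
--     s2=''
--     for i in s:
--         if i>='a' and i<='z':
--             s2+=chr(ord(i)-32)
--         else:
--             s2+=i
--     return s2
-- ===== SOURCE B (Python) =====
-- _TABLE = {c: c - 32 for c in range(ord('a'), ord('z') + 1)}
--
-- def upit(s):
--     return s.translate(_TABLE)
-- ===== Notes on version B (the rewrite author's own statement) =====
-- stated objective: idiomatic
-- what changed: Replaces the explicit char-by-char branch-and-concatenate loop with a precomputed lowercase-to-uppercase translation table and a single s.translate(table) pass.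
import Mathlib
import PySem

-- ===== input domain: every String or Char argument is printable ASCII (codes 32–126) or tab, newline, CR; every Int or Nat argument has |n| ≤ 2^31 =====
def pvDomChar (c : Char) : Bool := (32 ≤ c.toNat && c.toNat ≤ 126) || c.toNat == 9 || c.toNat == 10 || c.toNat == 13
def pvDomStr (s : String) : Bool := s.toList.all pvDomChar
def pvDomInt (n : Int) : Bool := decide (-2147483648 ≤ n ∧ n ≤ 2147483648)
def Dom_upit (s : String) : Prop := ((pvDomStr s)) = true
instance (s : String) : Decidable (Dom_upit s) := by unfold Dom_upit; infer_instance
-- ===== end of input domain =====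

-- B replaces A's char-by-char branch-and-concatenate loop with a precomputed
-- lowercase→uppercase translation table applied in one table-driven pass (idiomatic).

-- ===== PORT A =====
-- s2 = ''; for i in s: s2 += chr(ord(i)-32) if 'a' <= i <= 'z' else i; return s2
def upit (s : String) : String :=
  String.mk (s.toList.foldl
    (fun s2 i => if 'a' ≤ i ∧ i ≤ 'z' then s2 ++ [Char.ofNat (i.toNat - 32)] else s2 ++ [i])
    [])

-- ===== PORT B =====
-- _TABLE = {c: c - 32 for c in range(ord('a'), ord('z') + 1)}
def upitTable : PySem.Dict Int Int :=
  (PySem.List.pyRange 97 123 1).foldl (fun d c => d.insert c (c - 32)) PySem.Dict.empty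

-- s.translate(_TABLE): a char whose code point is a key becomes chr(value), others stay
def upit_alt (s : String) : String :=
  String.mk (s.toList.map (fun c =>
    match upitTable.get? (c.toNat : Int) with
    | some v => Char.ofNat v.toNat
    | none => c))

-- ===== PRECONDITION & SPEC =====
def Spec_upit (s : String) (out : String) : Prop := out = upit_alt s
instance (s : String) (out : String) : Decidable (Spec_upit s out) := by unfold Spec_upit; infer_instance

-- ===== CLAIM (what is proved, stated in full; the proofs are below) =====
def Claim_equal_upit : Prop := ∀ (s : String), Dom_upit s → Spec_upit s (upit s)

-- ===== LEMMAS AND PROOFS =====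

-- lookup in a dict built by inserting k ↦ k - 32 for every k in range(a, a+n)
theorem get?_foldRange (a : Int) (n : Nat) (d : PySem.Dict Int Int) (k : Int) :
    (((List.range n).map (fun (j : Nat) => a + (j : Int))).foldl
        (fun d c => d.insert c (c - 32)) d).get? k
      = if a ≤ k ∧ k < a + n then some (k - 32) else d.get? k := by
  induction n generalizing d with
  | zero =>
    simp only [List.range_zero, List.map_nil, List.foldl_nil]
    rw [if_neg (by omega)]
  | succ n ih =>
    simp only [List.range_succ, List.map_append, List.map_cons, List.map_nil,
      List.foldl_append, List.foldl_cons, List.foldl_nil]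
    rw [PySem.Dict.get?_insert, ih]
    push_cast
    split_ifs <;> (try rfl) <;> simp_all <;> omega

-- the table realises the lowercase→uppercase code-point map
theorem upitTable_get? (k : Int) :
    upitTable.get? k = if 97 ≤ k ∧ k ≤ 122 then some (k - 32) else none := by
  unfold upitTable
  rw [PySem.List.pyRange_one]
  norm_num
  rw [get?_foldRange, PySem.Dict.get?_empty]
  split_ifs <;> first | rfl | omega

-- 'a' <= c <= 'z' as a bound on the code point
theorem char_le_iff (c : Char) :
    ('a' ≤ c ∧ c ≤ 'z') ↔ (97 ≤ (c.toNat : Int) ∧ (c.toNat : Int) ≤ 122) := by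
  simp only [Char.le_def, UInt32.le_iff_toNat_le, Char.toNat_val,
    show 'a'.toNat = 97 from rfl, show 'z'.toNat = 122 from rfl]
  omega

-- per-character agreement of the table lookup with A's comparison branch
theorem upit_char_eq (c : Char) :
    (match upitTable.get? (c.toNat : Int) with
     | some v => Char.ofNat v.toNat
     | none => c) =
    (if 'a' ≤ c ∧ c ≤ 'z' then Char.ofNat (c.toNat - 32) else c) := by
  rw [upitTable_get?]
  by_cases h : 97 ≤ (c.toNat : Int) ∧ (c.toNat : Int) ≤ 122
  · rw [if_pos h, if_pos ((char_le_iff c).mpr h)]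
    show Char.ofNat ((c.toNat : Int) - 32).toNat = Char.ofNat (c.toNat - 32)
    congr 1
    omega
  · rw [if_neg h, if_neg (fun hcc => h ((char_le_iff c).mp hcc))]

-- ===== VERDICT (by name: the statement is the Claim_ definition above) =====
theorem upit_spec : Claim_equal_upit := by
  intro s _
  unfold Spec_upit upit upit_alt
  have hstep : ∀ (s2 : List Char) (i : Char),
      (if 'a' ≤ i ∧ i ≤ 'z' then s2 ++ [Char.ofNat (i.toNat - 32)] else s2 ++ [i])
      = s2 ++ [if 'a' ≤ i ∧ i ≤ 'z' then Char.ofNat (i.toNat - 32) else i] := by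
    intro s2 i; split_ifs <;> rfl
  simp only [hstep, PySem.List.foldl_append_singleton_eq_map, List.nil_append]
  congr 1
  exact List.map_congr_left (fun c _ => (upit_char_eq c).symm)
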